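-- pv_equiv track=rewrite | github.com/alberto-escobar/AoC2024 | day7/main.py | dfs
-- ===== SOURCE A (Python) =====
-- def dfs(numbers, i, current_sum, result):
--     if current_sum>result:
--         return False
--     if i == len(numbers):
--         return current_sum == result
--     else:
--         op1 = current_sum + numbers[i]
--         op2 = current_sum * numbers[i]
--         return dfs(numbers, i+1, op1, result) or dfs(numbers, i+1, op2, result)
-- ===== SOURCE B (Python) =====
-- def dfs(numbers, i, current_sum, result):
--     stack = [(i, current_sum)]
--     while stack:
--         j, s = stack.pop()
--         if s > result:
--             continue
--         if j == len(numbers):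
--             if s == result:
--                 return True
--             continue
--         stack.append((j + 1, s + numbers[j]))
--         stack.append((j + 1, s * numbers[j]))
--     return False
-- ===== Notes on version B (the rewrite author's own statement) =====
-- stated objective: alternative
-- what changed: Replaced the binary recursion (implicit call stack, short-circuit or) by an iterative depth-first search over an explicit stack of (index, accumulated value) states with the same overflow prune.
import Mathlib
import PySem

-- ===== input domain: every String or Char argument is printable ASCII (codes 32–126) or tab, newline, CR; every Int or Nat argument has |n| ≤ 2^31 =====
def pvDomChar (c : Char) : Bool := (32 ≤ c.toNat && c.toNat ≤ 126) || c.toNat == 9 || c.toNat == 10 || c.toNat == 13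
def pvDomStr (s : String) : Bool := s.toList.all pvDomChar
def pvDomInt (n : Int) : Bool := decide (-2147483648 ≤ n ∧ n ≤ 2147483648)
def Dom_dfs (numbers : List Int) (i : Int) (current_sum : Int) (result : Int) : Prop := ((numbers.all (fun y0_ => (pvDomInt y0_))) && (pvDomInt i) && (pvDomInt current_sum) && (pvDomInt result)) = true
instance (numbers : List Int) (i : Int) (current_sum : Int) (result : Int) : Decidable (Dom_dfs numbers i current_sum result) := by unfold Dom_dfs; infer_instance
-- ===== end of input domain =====

-- B replaces A's binary recursion by an iterative DFS over an explicit stack of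
-- (index, accumulated value) states; return value only, no side effects.

-- termination helper, cited by both ports' decreasing_by
theorem pv_lt_of_pyGet?_some {xs : List Int} {i x : Int}
    (h : PySem.List.pyGet? xs i = some x) : i < (xs.length : Int) := by
  by_contra hc
  have hn : PySem.List.pyGet? xs i = none := (PySem.List.pyGet?_eq_none_iff xs i).mpr (by
    intro hr
    unfold PySem.Raise.InRange at hr
    omega)
  rw [hn] at h; cases h

-- ===== PORT A =====
-- literal port of A's recursion; the 'none' branch is Python's IndexError (excluded by Pre_)
def dfs (numbers : List Int) (i : Int) (current_sum : Int) (result : Int) : Bool :=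
  if current_sum > result then false
  else if i = (numbers.length : Int) then current_sum == result
  else
    match h : PySem.List.pyGet? numbers i with
    | none => false
    | some x =>
        dfs numbers (i + 1) (current_sum + x) result
          || dfs numbers (i + 1) (current_sum * x) result
termination_by ((numbers.length : Int) - i).toNat
decreasing_by
  all_goals
    have hlt : i < (numbers.length : Int) := pv_lt_of_pyGet?_some h
    omega

-- ===== PORT B =====
-- iterative DFS loop of Source B: list head = stack top (Python's list end), so the
-- multiply state, pushed second, is popped first; 'none' = IndexError (excluded by Pre_)
def dfsStack (numbers : List Int) (result : Int) : List (Int × Int) → Bool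
  | [] => false
  | (j, s) :: rest =>
    if s > result then dfsStack numbers result rest
    else if j = (numbers.length : Int) then
      if s = result then true else dfsStack numbers result rest
    else
      match h : PySem.List.pyGet? numbers j with
      | none => dfsStack numbers result rest
      | some x =>
          dfsStack numbers result ((j + 1, s * x) :: (j + 1, s + x) :: rest)
termination_by st => (st.map (fun p => 3 ^ ((numbers.length : Int) - p.1).toNat)).sum
decreasing_by
  all_goals simp only [List.map_cons, List.sum_cons]
  · have h3 : 0 < 3 ^ (((numbers.length : Int) - j).toNat) := by positivity
    omega
  · have h3 : 0 < 3 ^ (((numbers.length : Int) - j).toNat) := by positivity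
    omega
  · have h3 : 0 < 3 ^ (((numbers.length : Int) - j).toNat) := by positivity
    omega
  · have hlt : j < (numbers.length : Int) := pv_lt_of_pyGet?_some h
    have hk : (((numbers.length : Int) - j).toNat) = (((numbers.length : Int) - (j + 1)).toNat) + 1 := by omega
    rw [hk, pow_succ]
    have h3 : 0 < 3 ^ (((numbers.length : Int) - (j + 1)).toNat) := by positivity
    omega

def dfs_alt (numbers : List Int) (i : Int) (current_sum : Int) (result : Int) : Bool :=
  dfsStack numbers result [(i, current_sum)]

-- ===== PRECONDITION & SPEC =====
-- Pre_ excludes exactly the inputs on which A raises IndexError: a start index i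
-- outside Python's valid range -len..len, reached only when the prune does not
-- return False first (current_sum ≤ result).
def Pre_dfs (numbers : List Int) (i : Int) (current_sum : Int) (result : Int) : Prop :=
  current_sum > result ∨ (-(numbers.length : Int) ≤ i ∧ i ≤ (numbers.length : Int))
instance (numbers : List Int) (i : Int) (current_sum : Int) (result : Int) : Decidable (Pre_dfs numbers i current_sum result) := by unfold Pre_dfs; infer_instance

def pvWitness_dfs : List Int × Int × Int × Int := ([2, 3, 4], 0, 0, 14)

def Spec_dfs (numbers : List Int) (i : Int) (current_sum : Int) (result : Int) (out : Bool) : Prop := out = dfs_alt numbers i current_sum result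
instance (numbers : List Int) (i : Int) (current_sum : Int) (result : Int) (out : Bool) : Decidable (Spec_dfs numbers i current_sum result out) := by unfold Spec_dfs; infer_instance

-- ===== CLAIM (what is proved, stated in full; the proofs are below) =====
def Claim_equal_dfs : Prop := ∀ (numbers : List Int) (i : Int) (current_sum : Int) (result : Int), Dom_dfs numbers i current_sum result → Pre_dfs numbers i current_sum result → Spec_dfs numbers i current_sum result (dfs numbers i current_sum result)

-- ===== LEMMAS AND PROOFS =====

theorem dfs_of_gt {numbers : List Int} {j s r : Int} (h : s > r) :
    dfs numbers j s r = false := by rw [dfs]; simp [h]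

theorem dfs_of_end {numbers : List Int} {j s r : Int} (h1 : ¬ s > r)
    (h2 : j = (numbers.length : Int)) : dfs numbers j s r = (s == r) := by
  rw [dfs]; simp [h1, h2]

theorem dfs_of_none {numbers : List Int} {j s r : Int} (h1 : ¬ s > r)
    (h2 : ¬ j = (numbers.length : Int)) (h : PySem.List.pyGet? numbers j = none) :
    dfs numbers j s r = false := by
  rw [dfs]; rw [if_neg h1, if_neg h2]
  split <;> simp_all

theorem dfs_of_some {numbers : List Int} {j s r x : Int} (h1 : ¬ s > r)
    (h2 : ¬ j = (numbers.length : Int)) (h : PySem.List.pyGet? numbers j = some x) :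
    dfs numbers j s r = (dfs numbers (j + 1) (s + x) r || dfs numbers (j + 1) (s * x) r) := by
  rw [dfs]; rw [if_neg h1, if_neg h2]
  split <;> simp_all

-- loop invariant: the stack loop returns the disjunction of A's recursion over the stacked states
theorem dfsStack_eq_any (numbers : List Int) (result : Int) (st : List (Int × Int)) :
    dfsStack numbers result st = st.any (fun p => dfs numbers p.1 p.2 result) := by
  induction st using dfsStack.induct numbers result with
  | case1 => simp [dfsStack]
  | case2 j s rest h ih =>
      rw [dfsStack, if_pos h, ih]
      simp [dfs_of_gt h]
  | case3 rest h =>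
      rw [dfsStack, if_neg h, if_pos rfl, if_pos rfl]
      simp [dfs_of_end h rfl]
  | case4 s rest h1 h2 ih =>
      rw [dfsStack, if_neg h1, if_pos rfl, if_neg h2, ih]
      simp [dfs_of_end h1 rfl, h2]
  | case5 j s rest h1 h2 h ih =>
      rw [dfsStack, if_neg h1, if_neg h2]
      split
      · rw [ih]; simp [dfs_of_none h1 h2 h]
      · simp_all
  | case6 j s rest h1 h2 x h ih =>
      rw [dfsStack, if_neg h1, if_neg h2]
      split
      · simp_all
      · rename_i x1 heq
        rw [h] at heq
        injection heq with hx1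
        subst hx1
        rw [ih]
        simp only [List.any_cons, dfs_of_some h1 h2 h]
        rw [← Bool.or_assoc, Bool.or_comm (dfs numbers (j + 1) (s * x) result)]

-- ===== VERDICT (by name: the statement is the Claim_ definition above) =====
theorem dfs_spec : Claim_equal_dfs := by
  intro numbers i current_sum result _ _
  unfold Spec_dfs dfs_alt
  rw [dfsStack_eq_any]
  simp
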